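-- pv_equiv track=rewrite | github.com/Oenarion/CDMO-Project | SAT/main_BETA.py | maxNumberItem
-- ===== SOURCE A (Python) =====
-- def maxNumberItem(s, l):
--     max_l = max(l)
--     s_copy = s.copy()
--     s_copy.sort()
--     tmp = 0
--     i = 0
--     while(tmp+s_copy[i] < max_l):
--         tmp = tmp + s_copy[i]
--         i += 1
--     return i
-- ===== SOURCE B (Python) =====
-- def maxNumberItem(s, l):
--     # Selection instead of sorting: never sort s; repeatedly extract the current
--     # minimum of the remaining multiset while the running sum stays below max(l).
--     max_l = max(l)
--     remaining = list(s)
--     tmp = 0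
--     count = 0
--     while True:
--         m = min(remaining)
--         if tmp + m < max_l:
--             remaining.remove(m)
--             tmp += m
--             count += 1
--         else:
--             return count
-- ===== Notes on version B (the rewrite author's own statement) =====
-- stated objective: alternative
-- what changed: B drops the sort entirely: it repeatedly extracts the current minimum from the remaining multiset (selection) while the running sum stays below max(l), instead of A's sort-then-scan.
import Mathlib
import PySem

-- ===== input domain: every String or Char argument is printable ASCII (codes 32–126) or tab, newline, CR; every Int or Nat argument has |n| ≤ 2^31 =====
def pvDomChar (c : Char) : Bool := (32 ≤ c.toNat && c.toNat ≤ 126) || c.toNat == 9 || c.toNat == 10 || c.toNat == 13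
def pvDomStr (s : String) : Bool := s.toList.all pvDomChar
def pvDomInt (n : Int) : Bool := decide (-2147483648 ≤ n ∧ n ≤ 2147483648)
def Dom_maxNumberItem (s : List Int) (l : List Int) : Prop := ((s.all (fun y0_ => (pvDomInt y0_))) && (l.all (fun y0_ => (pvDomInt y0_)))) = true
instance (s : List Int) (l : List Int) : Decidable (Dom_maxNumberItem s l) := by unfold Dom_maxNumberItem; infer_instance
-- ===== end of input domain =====

-- B removes the sort: it repeatedly extracts the current minimum of the remaining
-- multiset while the running sum stays below max(l) (objective: alternative).

-- ===== PORT A =====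
-- while (tmp + s_copy[i] < max_l): tmp += s_copy[i]; i += 1
-- (structural recursion over the sorted list; the [] case is Python's IndexError, excluded by Pre_)
def pvALoop (xs : List Int) (tmp : Int) (i : Int) (maxl : Int) : Int :=
  match xs with
  | [] => i
  | x :: rest => if tmp + x < maxl then pvALoop rest (tmp + x) (i + 1) maxl else i

def maxNumberItem (s : List Int) (l : List Int) : Int :=
  let max_l := (PySem.List.max? l (fun x => x)).getD 0
  let s_copy := PySem.List.sorted s (fun x => x) false
  pvALoop s_copy 0 0 max_l

-- ===== PORT B =====
-- while True: m = min(remaining); if tmp+m < max_l: remaining.remove(m); tmp += m; count += 1 else: return count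
-- (the none case is Python's ValueError on min([]), excluded by Pre_; remaining.remove(m)
--  is List.erase: m is the minimum, hence a member, so Python's remove always succeeds —
--  exact by PySem.List.remove?_eq_some_erase)
def pvBLoop (rem : List Int) (tmp : Int) (count : Int) (maxl : Int) : Int :=
  match h : PySem.List.min? rem (fun x => x) with
  | none => count
  | some m =>
    if tmp + m < maxl then
      pvBLoop (rem.erase m) (tmp + m) (count + 1) maxl
    else count
termination_by rem.length
decreasing_by
  have hm : m ∈ rem := PySem.List.min?_mem h
  have hlen := List.length_erase_of_mem hm
  have hne : rem.length ≠ 0 := by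
    simp only [ne_eq, List.length_eq_zero_iff]; rintro rfl; simp at hm
  omega

def maxNumberItem_alt (s : List Int) (l : List Int) : Int :=
  let max_l := (PySem.List.max? l (fun x => x)).getD 0
  pvBLoop s 0 0 max_l

-- ===== PRECONDITION & SPEC =====
-- Exactly the inputs on which Python A returns: l and s nonempty (else max(l)/s_copy[0]
-- raises) and some prefix sum of sorted(s) reaches max(l), i.e. the total sum does, or
-- the minimum element already does (prefix sums of a sorted list peak at one of those two).
def Pre_maxNumberItem (s : List Int) (l : List Int) : Prop :=
  l ≠ [] ∧ s ≠ [] ∧ ((∀ y ∈ l, y ≤ s.sum) ∨ (∀ x ∈ s, ∀ y ∈ l, y ≤ x))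
instance (s : List Int) (l : List Int) : Decidable (Pre_maxNumberItem s l) := by unfold Pre_maxNumberItem; infer_instance
def pvWitness_maxNumberItem : List Int × List Int := ([3, 1, 2], [4])

def Spec_maxNumberItem (s : List Int) (l : List Int) (out : Int) : Prop := out = maxNumberItem_alt s l
instance (s : List Int) (l : List Int) (out : Int) : Decidable (Spec_maxNumberItem s l out) := by unfold Spec_maxNumberItem; infer_instance

-- ===== CLAIM (what is proved, stated in full; the proofs are below) =====
def Claim_equal_maxNumberItem : Prop := ∀ (s : List Int) (l : List Int), Dom_maxNumberItem s l → Pre_maxNumberItem s l → Spec_maxNumberItem s l (maxNumberItem s l)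

-- ===== LEMMAS AND PROOFS =====

-- Extracting the minimum m from rem names the head of sorted(rem).
theorem sorted_eq_min_cons (rem : List Int) (m : Int)
    (h : PySem.List.min? rem (fun x => x) = some m) :
    PySem.List.sorted rem (fun x => x) false =
      m :: PySem.List.sorted (rem.erase m) (fun x => x) false := by
  have hm : m ∈ rem := PySem.List.min?_mem h
  apply PySem.List.sorted_id_eq_of_perm_of_pairwise
  · exact (List.Perm.cons m (PySem.List.sorted_perm (rem.erase m) (fun x => x) false)).trans
      (List.perm_cons_erase hm).symm
  · refine List.pairwise_cons.mpr ⟨?_, ?_⟩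
    · intro y hy
      have hy' : y ∈ rem.erase m :=
        (PySem.List.mem_sorted (rem.erase m) (fun x => x) false y).mp hy
      exact PySem.List.min?_isMin h y (List.mem_of_mem_erase hy')
    · exact PySem.List.sorted_pairwise (rem.erase m) (fun x => x)

-- B's selection loop computes A's scan of the sorted list.
theorem pvBLoop_eq_pvALoop (rem : List Int) (tmp count maxl : Int) :
    pvBLoop rem tmp count maxl =
      pvALoop (PySem.List.sorted rem (fun x => x) false) tmp count maxl := by
  rw [pvBLoop.eq_def]
  split
  next h =>
    have hnil : rem = [] := (PySem.List.min?_eq_none_iff rem fun x => x).mp h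
    subst hnil
    simp [pvALoop, PySem.List.sorted]
  next m h =>
    rw [sorted_eq_min_cons rem m h]
    simp only [pvALoop]
    split
    · exact pvBLoop_eq_pvALoop (rem.erase m) (tmp + m) (count + 1) maxl
    · rfl
termination_by rem.length
decreasing_by
  rename_i m hsome _hlt
  have hm := PySem.List.min?_mem hsome
  have hlen := List.length_erase_of_mem hm
  have hne : rem.length ≠ 0 := by
    simp only [ne_eq, List.length_eq_zero_iff]; rintro rfl; simp at hm
  omega

-- ===== VERDICT (by name: the statement is the Claim_ definition above) =====
theorem maxNumberItem_spec : Claim_equal_maxNumberItem := by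
  intro s l _ _
  show maxNumberItem s l = maxNumberItem_alt s l
  unfold maxNumberItem maxNumberItem_alt
  exact (pvBLoop_eq_pvALoop s 0 0 ((PySem.List.max? l (fun x => x)).getD 0)).symm
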